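-- pv_equiv track=rewrite | github.com/FireAnts-PSU-Capstone-team/capstone | kanabi/validation/intake_validation.py | validateEndorsement
-- ===== SOURCE A (Python) =====
-- valid_endorsements = ["CT", "ED", "EX", "TO"]
--
-- def validateEndorsement(endorsementList):
--     # validates that each of the involved substrings are one of the endorse types and none are repeated.
--     stringEndorsement = str(endorsementList).upper().strip()
--     if len(stringEndorsement) == 0 or stringEndorsement.lower() == 'nan':  # This is a valid outcome
--         return True
--     splitEndorse = stringEndorsement.split(',')
--     # keep track of seen items
--     endorsement_counts = {}
--     for item in splitEndorse:
--         # if we haven't seen the item before, set count to 0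
--         if item not in endorsement_counts:
--             endorsement_counts[item] = 0
--         # if item is valid, increment counter
--         if item in valid_endorsements:
--             endorsement_counts[item] += 1
--         else:
--             return False
--         # if we've already seen the item, reject it
--         if endorsement_counts[item] > 1:
--             return False
--     return True
-- ===== SOURCE B (Python) =====
-- valid_endorsements = ["CT", "ED", "EX", "TO"]
--
-- def validateEndorsement(endorsementList):
--     # Same prefix as the original: normalise, accept empty / 'nan'.
--     stringEndorsement = str(endorsementList).upper().strip()
--     if len(stringEndorsement) == 0 or stringEndorsement.lower() == 'nan':
--         return True
--     splitEndorse = stringEndorsement.split(',')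
--     # Two independent passes instead of one counting loop with a dict:
--     all_valid = all(x in valid_endorsements for x in splitEndorse)
--     no_repeats = len(set(splitEndorse)) == len(splitEndorse)
--     return all_valid and no_repeats
-- ===== Notes on version B (the rewrite author's own statement) =====
-- stated objective: simpler
-- what changed: The single stateful loop that maintains a count dictionary and early-returns is replaced by two independent passes: an all(...) validity check and a set-size comparison for duplicate detection.
import Mathlib
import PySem

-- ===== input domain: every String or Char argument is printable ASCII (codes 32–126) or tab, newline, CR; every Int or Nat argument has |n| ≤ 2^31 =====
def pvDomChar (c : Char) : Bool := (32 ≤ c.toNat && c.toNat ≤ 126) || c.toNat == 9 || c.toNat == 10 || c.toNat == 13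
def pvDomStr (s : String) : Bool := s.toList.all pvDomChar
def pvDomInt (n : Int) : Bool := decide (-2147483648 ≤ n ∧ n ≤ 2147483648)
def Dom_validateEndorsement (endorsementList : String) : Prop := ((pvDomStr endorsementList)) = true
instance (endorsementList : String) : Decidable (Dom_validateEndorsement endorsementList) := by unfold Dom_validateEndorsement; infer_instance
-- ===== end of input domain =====

-- B keeps the original's normalisation prefix but replaces the single counting-dict
-- loop with two independent passes (an all-valid check and a set-size duplicate check): simpler.

def validEndorsements : List String := ["CT", "ED", "EX", "TO"]

-- ===== PORT A =====
-- the for-loop over splitEndorse, carrying the endorsement_counts dict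
def vEndLoopA : PySem.Dict String Int → List String → Bool
  | _, [] => true
  | counts, item :: rest =>
    -- if item not in endorsement_counts: endorsement_counts[item] = 0
    let counts := if counts.contains item then counts else counts.insert item 0
    if validEndorsements.contains item then
      -- endorsement_counts[item] += 1
      let counts := counts.insert item (counts.getD item 0 + 1)
      -- if endorsement_counts[item] > 1: return False
      if counts.getD item 0 > 1 then false else vEndLoopA counts rest
    else false

def validateEndorsement (endorsementList : String) : Bool :=
  let stringEndorsement := PySem.Str.strip (PySem.Str.upper endorsementList)
  if PySem.Str.len stringEndorsement == 0 || PySem.Str.lower stringEndorsement == "nan" then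
    true
  else
    -- split(',') with a non-empty separator never raises: split? returns some
    vEndLoopA PySem.Dict.empty ((PySem.Str.split? stringEndorsement ",").getD [])

-- ===== PORT B =====
def validateEndorsement_alt (endorsementList : String) : Bool :=
  let stringEndorsement := PySem.Str.strip (PySem.Str.upper endorsementList)
  if PySem.Str.len stringEndorsement == 0 || PySem.Str.lower stringEndorsement == "nan" then
    true
  else
    let splitEndorse := (PySem.Str.split? stringEndorsement ",").getD []
    let allValid := splitEndorse.all (fun x => validEndorsements.contains x)
    let noRepeats := PySem.Set.len (PySem.Set.ofList splitEndorse) == (splitEndorse.length : Int)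
    allValid && noRepeats

-- ===== PRECONDITION & SPEC =====
def Spec_validateEndorsement (endorsementList : String) (out : Bool) : Prop := out = validateEndorsement_alt endorsementList
instance (endorsementList : String) (out : Bool) : Decidable (Spec_validateEndorsement endorsementList out) := by unfold Spec_validateEndorsement; infer_instance

-- ===== CLAIM (what is proved, stated in full; the proofs are below) =====
def Claim_equal_validateEndorsement : Prop := ∀ (endorsementList : String), Dom_validateEndorsement endorsementList → Spec_validateEndorsement endorsementList (validateEndorsement endorsementList)

-- ===== LEMMAS AND PROOFS =====

-- the per-item "set count to 0 if unseen" step does not change any getD _ 0 value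
theorem getD_setzero (counts : PySem.Dict String Int) (item k : String) :
    (if counts.contains item then counts else counts.insert item 0).getD k 0 = counts.getD k 0 := by
  split
  · rfl
  · rename_i h
    rw [PySem.Dict.getD_insert]
    split
    · rename_i hk; subst hk
      rw [PySem.Dict.getD_of_not_contains _ _ (by simpa using h)]
    · rfl

-- A's loop, characterised: all items valid, no repeats, and nothing counted yet
theorem vEndLoopA_eq (xs : List String) (counts : PySem.Dict String Int)
    (hinv : ∀ k, counts.getD k 0 = 0 ∨ counts.getD k 0 = 1) :
    vEndLoopA counts xs =
      (xs.all (fun x => validEndorsements.contains x) && decide xs.Nodup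
        && decide (∀ x ∈ xs, counts.getD x 0 = 0)) := by
  induction xs generalizing counts with
  | nil => simp [vEndLoopA]
  | cons item rest ih =>
    rw [vEndLoopA]
    simp only
    by_cases hv : validEndorsements.contains item
    · rw [if_pos hv]
      have hz := getD_setzero counts item
      set counts1 := if counts.contains item then counts else counts.insert item 0 with hc1
      by_cases h1 : counts.getD item 0 = 0
      · -- item unseen: its count becomes 1, the loop continues
        have hval : (counts1.insert item (counts1.getD item 0 + 1)).getD item 0 = 1 := by
          rw [PySem.Dict.getD_insert]; rw [if_pos rfl, hz, h1]; omega
        rw [if_neg (by rw [hval]; omega)]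
        rw [ih _ (by
          intro k
          rw [PySem.Dict.getD_insert]
          split
          · right; rw [hz, h1]; omega
          · rw [hz]; exact hinv k)]
        have hrest : ∀ x ∈ rest,
            ((counts1.insert item (counts1.getD item 0 + 1)).getD x 0 = 0)
              ↔ (x ≠ item ∧ counts.getD x 0 = 0) := by
          intro x _
          rw [PySem.Dict.getD_insert]
          constructor
          · intro h0
            by_cases hxi : x = item
            · rw [if_pos hxi, hz, h1] at h0; omega
            · rw [if_neg hxi, hz] at h0; exact ⟨hxi, h0⟩
          · rintro ⟨hxi, h0⟩
            rw [if_neg hxi, hz]; exact h0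
        have hjoint :
            (decide rest.Nodup
              && decide (∀ x ∈ rest, (counts1.insert item (counts1.getD item 0 + 1)).getD x 0 = 0))
              = (decide (item :: rest).Nodup
                  && decide (∀ x ∈ item :: rest, counts.getD x 0 = 0)) := by
          rw [Bool.eq_iff_iff]
          simp only [Bool.and_eq_true, decide_eq_true_eq, List.nodup_cons, List.mem_cons]
          constructor
          · rintro ⟨hnd, h0⟩
            have hmem : ∀ x ∈ rest, x ≠ item ∧ counts.getD x 0 = 0 :=
              fun x hx => (hrest x hx).mp (h0 x hx)
            refine ⟨⟨fun hmm => (hmem item hmm).1 rfl, hnd⟩, ?_⟩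
            intro x hx
            rcases hx with rfl | hx
            · exact h1
            · exact (hmem x hx).2
          · rintro ⟨⟨hni, hnd⟩, h0⟩
            refine ⟨hnd, fun x hx => (hrest x hx).mpr ⟨fun he => hni (he ▸ hx), ?_⟩⟩
            exact h0 x (Or.inr hx)
        simp only [List.all_cons, hv, Bool.true_and, Bool.and_assoc, hjoint]
      · -- item already counted once: the counter reaches 2 and the loop rejects
        have h1' : counts.getD item 0 = 1 := (hinv item).resolve_left h1
        have hval : (counts1.insert item (counts1.getD item 0 + 1)).getD item 0 = 2 := by
          rw [PySem.Dict.getD_insert]; rw [if_pos rfl, hz, h1']; omega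
        rw [if_pos (by rw [hval]; omega)]
        have hno : ¬ (∀ x ∈ item :: rest, counts.getD x 0 = 0) := by
          intro h; have := h item (by simp); omega
        rw [decide_eq_false hno, Bool.and_false]
    · rw [if_neg hv]
      rw [List.all_cons, Bool.eq_false_iff.mpr hv]
      simp

theorem foldl_add_len_le (xs : List String) (s : List String) :
    (xs.foldl PySem.Set.add s).length ≤ s.length + xs.length := by
  induction xs generalizing s with
  | nil => simp
  | cons x xs ih =>
    simp only [List.foldl_cons, List.length_cons]
    have h2 := ih (PySem.Set.add s x)
    have hadd : (PySem.Set.add s x).length ≤ s.length + 1 := by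
      unfold PySem.Set.add
      split <;> simp
    omega

theorem foldl_add_len_eq_iff (xs : List String) (s : List String) :
    ((xs.foldl PySem.Set.add s).length = s.length + xs.length) ↔
      (xs.Nodup ∧ ∀ x ∈ xs, x ∉ s) := by
  induction xs generalizing s with
  | nil => simp
  | cons x xs ih =>
    simp only [List.foldl_cons, List.length_cons, List.nodup_cons]
    by_cases hx : x ∈ s
    · have hadd : PySem.Set.add s x = s := by
        unfold PySem.Set.add
        rw [if_pos (by simpa [PySem.Set.contains_iff] using hx)]
      rw [hadd]
      have hle := foldl_add_len_le xs s
      constructor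
      · intro h; omega
      · rintro ⟨_, h⟩
        exact absurd hx (h x (List.mem_cons_self ..))
    · have hadd : PySem.Set.add s x = s ++ [x] := by
        unfold PySem.Set.add
        rw [if_neg (by simpa [PySem.Set.contains_iff] using hx)]
      rw [hadd,
          show s.length + (xs.length + 1) = (s ++ [x]).length + xs.length by simp; omega,
          ih]
      simp only [List.mem_append, List.mem_cons, List.not_mem_nil, or_false]
      constructor
      · rintro ⟨hnd, h⟩
        refine ⟨⟨fun hm => (h x hm) (Or.inr rfl), hnd⟩, ?_⟩
        intro y hy
        rcases hy with rfl | hy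
        · exact hx
        · exact fun hys => (h y hy) (Or.inl hys)
      · rintro ⟨⟨hnx, hnd⟩, h⟩
        refine ⟨hnd, fun y hy => ?_⟩
        rintro (hys | rfl)
        · exact h y (Or.inr hy) hys
        · exact hnx hy

-- B's set-size duplicate test is exactly a Nodup test
theorem noRepeats_eq (xs : List String) :
    (PySem.Set.len (PySem.Set.ofList xs) == (xs.length : Int)) = decide xs.Nodup := by
  have h := foldl_add_len_eq_iff xs []
  simp only [List.not_mem_nil, not_false_iff, implies_true, and_true, List.length_nil,
    Nat.zero_add] at h
  rw [PySem.Set.ofList_eq_foldl]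
  unfold PySem.Set.len
  rw [Bool.eq_iff_iff]
  simp only [beq_iff_eq, decide_eq_true_eq, Nat.cast_inj]
  exact h

-- ===== VERDICT (by name: the statement is the Claim_ definition above) =====
theorem validateEndorsement_spec : Claim_equal_validateEndorsement := by
  intro s _
  unfold Spec_validateEndorsement validateEndorsement validateEndorsement_alt
  simp only
  split
  · rfl
  · rw [vEndLoopA_eq _ _ (fun k => Or.inl (PySem.Dict.getD_empty ..)),
        noRepeats_eq]
    simp [PySem.Dict.getD_empty]
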